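-- pv_equiv track=rewrite | github.com/unabl4/codefights | equitable_meetup/equitable_meetup.py | equitableMeetup
-- ===== SOURCE A (Python) =====
-- def equitableMeetup(r):
--     n = len(r)
--     totals = [i[0] for i in r] # at least one house is visited
--     houses = [1] * n # number of visited houses counters for each friend
--     best = houses.copy() # copy is important
--     best_spread = max(totals)-min(totals) # initial spread
--
--     while True:
--         m = -1 # min
--
--         # select the friend with the lowest number of candies
--         for i in range(n):
--             if houses[i] < len(r[i]) and (m == -1 or totals[i] < totals[m]):
--                 m = i
--
--         if m == -1:
--             break
--
--         # go to the next house
--         totals[m] += r[m][houses[m]]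
--         houses[m] += 1
--
--         # re-calculate the spread and see if it is any better now
--         spread = max(totals)-min(totals)
--         if spread < best_spread:
--             best_spread = spread
--             best = houses.copy() # copy is important
--
--     return best
-- ===== SOURCE B (Python) =====
-- def _ins_val(a, x):
--     # insert x into the ascending list a (linear scan, no stdlib)
--     i = 0
--     while i < len(a) and a[i] < x:
--         i += 1
--     a.insert(i, x)
--
--
-- def _ins_pair(a, p):
--     # insert pair p into the ascending (lexicographic) list a
--     i = 0
--     while i < len(a) and a[i] < p:
--         i += 1
--     a.insert(i, p)
--
--
-- def equitableMeetup(r):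
--     # Priority-queue formulation: keep the not-yet-exhausted friends in an
--     # ordered list keyed by (total, index) -- the next friend to advance is
--     # always its head, no argmin scan -- and keep the multiset of all totals
--     # in an ordered list so the spread is last - first, no max()/min() passes.
--     n = len(r)
--     houses = [1] * n
--     active = []  # ascending (total, friend) pairs, friends with houses left
--     all_t = []   # ascending multiset of every friend's current total
--     for i in range(n):
--         t = r[i][0]
--         _ins_val(all_t, t)
--         if len(r[i]) > 1:
--             _ins_pair(active, (t, i))
--     best = list(houses)
--     best_spread = all_t[-1] - all_t[0]
--     while active:
--         t, m = active.pop(0)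
--         nt = t + r[m][houses[m]]
--         houses[m] += 1
--         all_t.remove(t)
--         _ins_val(all_t, nt)
--         if houses[m] < len(r[m]):
--             _ins_pair(active, (nt, m))
--         spread = all_t[-1] - all_t[0]
--         if spread < best_spread:
--             best_spread = spread
--             best = list(houses)
--     return best
-- ===== Notes on version B (the rewrite author's own statement) =====
-- stated objective: alternative
-- what changed: A rescans all friends with a sentinel to pick the argmin and recomputes max()/min() over all totals each step; B maintains an ordered list of (total,index) pairs so the next friend is popped from its head and an ordered multiset of totals so the spread is last-minus-first, both updated incrementally.
-- outside the precondition, e.g. on equitableMeetup([]): A raises ValueError, B raises IndexError; on equitableMeetup([[]]): A raises IndexError, B raises IndexError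
import Mathlib
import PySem

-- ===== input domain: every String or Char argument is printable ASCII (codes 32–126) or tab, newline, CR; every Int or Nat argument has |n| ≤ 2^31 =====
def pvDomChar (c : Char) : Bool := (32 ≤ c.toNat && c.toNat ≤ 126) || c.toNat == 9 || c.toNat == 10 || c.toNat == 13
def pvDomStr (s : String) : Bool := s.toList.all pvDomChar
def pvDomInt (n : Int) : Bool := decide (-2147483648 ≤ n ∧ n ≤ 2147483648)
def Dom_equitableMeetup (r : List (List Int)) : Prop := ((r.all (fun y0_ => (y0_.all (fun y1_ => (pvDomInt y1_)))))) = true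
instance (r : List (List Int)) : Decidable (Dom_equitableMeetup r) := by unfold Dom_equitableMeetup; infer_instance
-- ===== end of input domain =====

-- B replaces A's per-step argmin rescan and max()/min() passes by incrementally
-- maintained ordered lists: head-pop friend selection, last-minus-first spread
-- (objective: alternative data structure, same worst-case cost).


-- ===== PORT A =====
-- max(totals) - min(totals)
def pvSpread (totals : List Int) : Int :=
  (PySem.List.max? totals (fun x => x)).getD 0 - (PySem.List.min? totals (fun x => x)).getD 0

-- the 'for i in range(n)' selection scan with the m == -1 sentinel
def pvSelectA (r : List (List Int)) (totals houses : List Int) : Int :=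
  (PySem.List.pyRange 0 (r.length : Int) 1).foldl
    (fun m i =>
      if PySem.List.pyGetD houses i 0 < PySem.List.len (PySem.List.pyGetD r i []) ∧
         (m = -1 ∨ PySem.List.pyGetD totals i 0 < PySem.List.pyGetD totals m 0)
      then i else m) (-1)

-- the 'while True' loop (fuel is a totality guard; (r.map length).sum + 1 iterations always suffice)
def pvLoopA (r : List (List Int)) : Nat → List Int → List Int → List Int → Int → List Int
  | 0, _, _, best, _ => best
  | fuel+1, totals, houses, best, bs =>
    let m := pvSelectA r totals houses
    if m = -1 then best
    else
      let totals' := PySem.List.pySetD totals m (PySem.List.pyGetD totals m 0 +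
        PySem.List.pyGetD (PySem.List.pyGetD r m []) (PySem.List.pyGetD houses m 0) 0)
      let houses' := PySem.List.pySetD houses m (PySem.List.pyGetD houses m 0 + 1)
      let s := pvSpread totals'
      if s < bs then pvLoopA r fuel totals' houses' houses' s
      else pvLoopA r fuel totals' houses' best bs

def equitableMeetup (r : List (List Int)) : List Int :=
  let totals := r.map (fun row => PySem.List.pyGetD row 0 0)
  let houses := List.replicate r.length (1 : Int)
  pvLoopA r ((r.map List.length).sum + 1) totals houses houses (pvSpread totals)

-- ===== PORT B =====
-- Python tuple comparison (total, index) < (total', index')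
def pvPairLtB (p q : Int × Int) : Bool := p.1 < q.1 || (p.1 == q.1 && p.2 < q.2)

-- _ins_val: insert into an ascending list before the first element not < x
def pvInsV (x : Int) : List Int → List Int
  | [] => [x]
  | y :: ys => if y < x then y :: pvInsV x ys else x :: y :: ys

-- _ins_pair: the same for (total, index) pairs under tuple order
def pvInsP (p : Int × Int) : List (Int × Int) → List (Int × Int)
  | [] => [p]
  | q :: qs => if pvPairLtB q p then q :: pvInsP p qs else p :: q :: qs

-- all_t.remove(t): drop the first occurrence
def pvRemV (v : Int) : List Int → List Int
  | [] => []
  | y :: ys => if y = v then ys else y :: pvRemV v ys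

-- the 'while active' loop of B
def pvLoopB (r : List (List Int)) :
    Nat → List Int → List (Int × Int) → List Int → List Int → Int → List Int
  | 0, _, _, _, best, _ => best
  | fuel+1, houses, active, allT, best, bs =>
    match active with
    | [] => best
    | (t, m) :: rest =>
      let hm := PySem.List.pyGetD houses m 0
      let nt := t + PySem.List.pyGetD (PySem.List.pyGetD r m []) hm 0
      let houses' := PySem.List.pySetD houses m (hm + 1)
      let allT' := pvInsV nt (pvRemV t allT)
      let active' :=
        if hm + 1 < PySem.List.len (PySem.List.pyGetD r m []) then pvInsP (nt, m) rest else rest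
      let s := PySem.List.pyGetD allT' (-1) 0 - PySem.List.pyGetD allT' 0 0
      if s < bs then pvLoopB r fuel houses' active' allT' houses' s
      else pvLoopB r fuel houses' active' allT' best bs

def equitableMeetup_alt (r : List (List Int)) : List Int :=
  let init := (PySem.List.pyRange 0 (r.length : Int) 1).foldl
    (fun (st : List Int × List (Int × Int)) i =>
      let t := PySem.List.pyGetD (PySem.List.pyGetD r i []) 0 0
      (pvInsV t st.1,
       if 1 < PySem.List.len (PySem.List.pyGetD r i []) then pvInsP (t, i) st.2 else st.2))
    ([], [])
  let houses := List.replicate r.length (1 : Int)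
  pvLoopB r ((r.map List.length).sum + 1) houses init.2 init.1 houses
    (PySem.List.pyGetD init.1 (-1) 0 - PySem.List.pyGetD init.1 0 0)

-- ===== PRECONDITION & SPEC =====
-- Pre_ excludes exactly the inputs where the Python A raises: r = [] (max() of an
-- empty sequence, ValueError) and any empty row (r[i][0], IndexError).
def Pre_equitableMeetup (r : List (List Int)) : Prop :=
  r ≠ [] ∧ ∀ row ∈ r, row ≠ []
instance (r : List (List Int)) : Decidable (Pre_equitableMeetup r) := by
  unfold Pre_equitableMeetup; infer_instance
def pvWitness_equitableMeetup : List (List Int) := [[1, 2], [3]]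

def Spec_equitableMeetup (r : List (List Int)) (out : List Int) : Prop := out = equitableMeetup_alt r
instance (r : List (List Int)) (out : List Int) : Decidable (Spec_equitableMeetup r out) := by unfold Spec_equitableMeetup; infer_instance

-- ===== CLAIM (what is proved, stated in full; the proofs are below) =====
def Claim_equal_equitableMeetup : Prop := ∀ (r : List (List Int)), Dom_equitableMeetup r → Pre_equitableMeetup r → Spec_equitableMeetup r (equitableMeetup r)

-- ===== LEMMAS AND PROOFS =====

-- the strict lexicographic order on (total, index) pairs, as a Prop
def pvPairLt (p q : Int × Int) : Prop := p.1 < q.1 ∨ (p.1 = q.1 ∧ p.2 < q.2)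

lemma pvPairLtB_iff (p q : Int × Int) : pvPairLtB p q = true ↔ pvPairLt p q := by
  simp [pvPairLtB, pvPairLt]

lemma pvPairLt_trans {a b c : Int × Int} (h1 : pvPairLt a b) (h2 : pvPairLt b c) : pvPairLt a c := by
  rcases h1 with h1 | ⟨h1, h1'⟩ <;> rcases h2 with h2 | ⟨h2, h2'⟩ <;>
    [left; left; left; right] <;> omega

lemma pvPairLt_irrefl (a : Int × Int) : ¬ pvPairLt a a := by
  simp [pvPairLt]

lemma pvPairLt_total {a b : Int × Int} (h : a.2 ≠ b.2) : pvPairLt a b ∨ pvPairLt b a := by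
  rcases lt_trichotomy a.1 b.1 with h1 | h1 | h1
  · exact Or.inl (Or.inl h1)
  · rcases lt_or_gt_of_ne h with h2 | h2
    · exact Or.inl (Or.inr ⟨h1, h2⟩)
    · exact Or.inr (Or.inr ⟨h1.symm, h2⟩)
  · exact Or.inr (Or.inl h1)

-- the loop invariant tying A's (totals, houses) to B's (active, allT)
def pvInv (r : List (List Int)) (totals houses : List Int)
    (active : List (Int × Int)) (allT : List Int) : Prop :=
  totals.length = r.length ∧ houses.length = r.length ∧
  allT.Perm totals ∧ allT.Pairwise (· ≤ ·) ∧
  active.Pairwise pvPairLt ∧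
  (∀ u i, (u, i) ∈ active ↔ 0 ≤ i ∧ i < (r.length : Int) ∧
      PySem.List.pyGetD houses i 0 < PySem.List.len (PySem.List.pyGetD r i []) ∧
      u = PySem.List.pyGetD totals i 0)

-- ordered-insert facts
lemma pvInsV_perm (x : Int) (l : List Int) : (pvInsV x l).Perm (x :: l) := by
  induction l with
  | nil => simp [pvInsV]
  | cons y ys ih =>
    by_cases h : y < x
    · simpa [pvInsV, h] using ((ih.cons y).trans (List.Perm.swap x y ys))
    · simp [pvInsV, h]

lemma pvInsV_sorted (x : Int) (l : List Int) (h : l.Pairwise (· ≤ ·)) :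
    (pvInsV x l).Pairwise (· ≤ ·) := by
  induction l with
  | nil => simp [pvInsV]
  | cons y ys ih =>
    rw [List.pairwise_cons] at h
    by_cases hyx : y < x
    · rw [pvInsV, if_pos hyx, List.pairwise_cons]
      refine ⟨?_, ih h.2⟩
      intro z hz
      rcases List.mem_cons.mp ((pvInsV_perm x ys).mem_iff.mp hz) with rfl | hz
      · omega
      · exact h.1 z hz
    · rw [pvInsV, if_neg hyx, List.pairwise_cons]
      refine ⟨?_, List.pairwise_cons.mpr h⟩
      intro z hz
      rcases List.mem_cons.mp hz with rfl | hz
      · omega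
      · exact le_trans (by omega) (h.1 z hz)

lemma pvInsP_perm (p : Int × Int) (l : List (Int × Int)) : (pvInsP p l).Perm (p :: l) := by
  induction l with
  | nil => simp [pvInsP]
  | cons q qs ih =>
    by_cases h : pvPairLtB q p
    · simpa [pvInsP, h] using ((ih.cons q).trans (List.Perm.swap p q qs))
    · simp [pvInsP, h]

lemma pvInsP_pairwise (p : Int × Int) (l : List (Int × Int)) (h : l.Pairwise pvPairLt)
    (htot : ∀ q ∈ l, pvPairLt p q ∨ pvPairLt q p) : (pvInsP p l).Pairwise pvPairLt := by
  induction l with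
  | nil => simp [pvInsP]
  | cons q qs ih =>
    rw [List.pairwise_cons] at h
    by_cases hqp : pvPairLtB q p
    · rw [pvInsP, if_pos hqp, List.pairwise_cons]
      refine ⟨?_, ih h.2 (fun z hz => htot z (by simp [hz]))⟩
      intro z hz
      rcases List.mem_cons.mp ((pvInsP_perm p qs).mem_iff.mp hz) with rfl | hz
      · exact (pvPairLtB_iff q z).mp hqp
      · exact h.1 z hz
    · rw [pvInsP, if_neg hqp, List.pairwise_cons]
      have hpq : pvPairLt p q := by
        rcases htot q (by simp) with h' | h'
        · exact h'
        · exact absurd ((pvPairLtB_iff q p).mpr h') hqp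
      refine ⟨?_, List.pairwise_cons.mpr h⟩
      intro z hz
      rcases List.mem_cons.mp hz with rfl | hz
      · exact hpq
      · exact pvPairLt_trans hpq (h.1 z hz)

lemma pvRemV_eq_erase (v : Int) (l : List Int) : pvRemV v l = l.erase v := by
  induction l with
  | nil => rfl
  | cons y ys ih =>
    by_cases h : y = v <;> simp [pvRemV, h, ih]

-- indexing with a nonnegative index into a set list
lemma pvGetD_setD (xs : List Int) (i j v : Int) (hi : 0 ≤ i) (hj : 0 ≤ j)
    (hjl : j < (xs.length : Int)) :
    PySem.List.pyGetD (PySem.List.pySetD xs j v) i 0 = if i = j then v else PySem.List.pyGetD xs i 0 := by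
  rw [PySem.List.pySetD_of_nonneg xs v hj,
      PySem.List.pyGetD_of_nonneg _ 0 hi, PySem.List.pyGetD_of_nonneg xs 0 hi]
  by_cases h : i = j
  · subst h
    rw [if_pos rfl, List.getD_eq_getElem _ 0 (by simp; omega), List.getElem_set_self]
  · rw [if_neg h]
    unfold List.getD
    rw [List.getElem?_set_ne (by omega)]

lemma pvGetD_eq_getElem {α : Type} (xs : List α) (d : α) (i : Int) (hi : 0 ≤ i)
    (hil : i < (xs.length : Int)) :
    PySem.List.pyGetD xs i d = xs[i.toNat]'(by omega) := by
  rw [PySem.List.pyGetD_of_nonneg xs d hi, List.getD_eq_getElem xs d (by omega)]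

-- the first minimum under Python's strict-< scan, via min?
def pvMinStep (key : Int → Int) (acc : Option Int) (x : Int) : Option Int :=
  acc.elim (some x) (fun m => if key x < key m then some x else some m)

lemma pvMin?_eq_foldl (xs : List Int) (key : Int → Int) :
    PySem.List.min? xs key = xs.foldl (pvMinStep key) none := by
  unfold PySem.List.min?
  congr 1
  funext acc x
  cases acc <;> rfl

lemma pvFoldl_minStep_stay (key : Int → Int) (a : Int) :
    ∀ l : List Int, (∀ j ∈ l, ¬ key j < key a) → l.foldl (pvMinStep key) (some a) = some a := by
  intro l
  induction l with
  | nil => intro _; rfl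
  | cons j rest ih =>
    intro h
    have hj : ¬ key j < key a := h j (by simp)
    simpa [pvMinStep, Option.elim, hj] using ih (fun z hz => h z (by simp [hz]))

lemma pvFoldl_minStep_gt (key : Int → Int) (m : Int) :
    ∀ (l : List Int) (acc : Option Int), (∀ x, acc = some x → key m < key x) →
      (∀ j ∈ l, key m < key j) →
      ∀ x, l.foldl (pvMinStep key) acc = some x → key m < key x := by
  intro l
  induction l with
  | nil => intro acc hacc _ x hx; exact hacc x hx
  | cons j rest ih =>
    intro acc hacc hl x hx
    have hj : key m < key j := hl j (by simp)
    refine ih (pvMinStep key acc j) ?_ (fun z hz => hl z (by simp [hz])) x hx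
    intro y hy
    cases acc with
    | none =>
      simp [pvMinStep, Option.elim] at hy
      subst hy; exact hj
    | some a =>
      have ha := hacc a rfl
      by_cases hc : key j < key a
      · simp [pvMinStep, Option.elim, hc] at hy; subst hy; exact hj
      · simp [pvMinStep, Option.elim, hc] at hy; subst hy; exact ha

lemma pvMin?_first (xs : List Int) (key : Int → Int) (m : Int)
    (hsort : xs.Pairwise (· < ·)) (hm : m ∈ xs)
    (hmin : ∀ j ∈ xs, key m < key j ∨ (key m = key j ∧ m ≤ j)) :
    PySem.List.min? xs key = some m := by
  obtain ⟨pre, suf, rfl⟩ := List.append_of_mem hm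
  rw [pvMin?_eq_foldl, List.foldl_append, List.foldl_cons]
  rw [List.pairwise_append] at hsort
  have hpre : ∀ p ∈ pre, key m < key p := by
    intro p hp
    have hpm : p < m := hsort.2.2 p hp m (by simp)
    rcases hmin p (by simp [hp]) with h | ⟨_, h⟩
    · exact h
    · omega
  have hsuf : ∀ j ∈ suf, ¬ key j < key m := by
    intro j hj
    rcases hmin j (by simp [hj]) with h | ⟨h, _⟩ <;> omega
  have hacc : ∀ x, pre.foldl (pvMinStep key) none = some x → key m < key x :=
    pvFoldl_minStep_gt key m pre none (by rintro x ⟨⟩) hpre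
  have hstep : pvMinStep key (pre.foldl (pvMinStep key) none) m = some m := by
    cases hx : pre.foldl (pvMinStep key) none with
    | none => rfl
    | some x =>
      have := hacc x hx
      simp [pvMinStep, Option.elim, this]
  rw [hstep]
  exact pvFoldl_minStep_stay key m suf hsuf

-- A's selection scan equals min? over the eligible indices
def pvElig (r : List (List Int)) (houses : List Int) : List Int :=
  (PySem.List.pyRange 0 (r.length : Int) 1).filter
    (fun i => decide (PySem.List.pyGetD houses i 0 < PySem.List.len (PySem.List.pyGetD r i [])))

lemma pvSel_general (key : Int → Int) (P : Int → Prop) [DecidablePred P] :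
    ∀ (is : List Int) (m : Option Int),
      (∀ i ∈ is, 0 ≤ i) → (∀ x, m = some x → 0 ≤ x) →
      is.foldl (fun a i => if P i ∧ (a = -1 ∨ key i < key a) then i else a) (m.getD (-1))
        = ((is.filter (fun i => decide (P i))).foldl (pvMinStep key) m).getD (-1) := by
  intro is
  induction is with
  | nil => intro m _ _; rfl
  | cons i rest ih =>
    intro m hpos hm
    have hi : (0 : Int) ≤ i := hpos i (by simp)
    have hrest : ∀ j ∈ rest, (0 : Int) ≤ j := fun j hj => hpos j (by simp [hj])
    by_cases hP : P i
    · cases m with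
      | none =>
        have hcond : P i ∧ ((-1 : Int) = -1 ∨ key i < key (-1)) := ⟨hP, Or.inl rfl⟩
        simpa [hP, hcond, pvMinStep, Option.elim] using ih (some i) hrest (by rintro x hx2; cases hx2; exact hi)
      | some x =>
        have hx : (0 : Int) ≤ x := hm x rfl
        have hne : x ≠ -1 := by omega
        by_cases hlt : key i < key x
        · have hcond : P i ∧ (x = -1 ∨ key i < key x) := ⟨hP, Or.inr hlt⟩
          simpa [hP, hcond, hlt, pvMinStep, Option.elim] using ih (some i) hrest (by rintro y hy; cases hy; exact hi)
        · have hcond : ¬ (P i ∧ (x = -1 ∨ key i < key x)) := by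
            rintro ⟨_, h | h⟩
            · exact hne h
            · exact hlt h
          simpa [hP, hcond, hlt, hne, pvMinStep, Option.elim] using ih (some x) hrest (by rintro y hy; cases hy; exact hx)
    · simpa [hP] using ih m hrest hm

lemma pvSelectA_eq (r : List (List Int)) (totals houses : List Int) :
    pvSelectA r totals houses
      = (PySem.List.min? (pvElig r houses) (fun i => PySem.List.pyGetD totals i 0)).getD (-1) := by
  have h := pvSel_general (fun i => PySem.List.pyGetD totals i 0)
    (fun i => PySem.List.pyGetD houses i 0 < PySem.List.len (PySem.List.pyGetD r i []))
    (PySem.List.pyRange 0 (r.length : Int) 1) none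
    (by intro i hi; exact (PySem.List.mem_pyRange_one.mp hi).1)
    (by intro x hx; cases hx)
  rw [pvSelectA, pvElig, pvMin?_eq_foldl]
  exact h

-- selection agreement: empty active means the sentinel stays -1 …
lemma pvSel_nil (r : List (List Int)) (totals houses : List Int) (allT : List Int)
    (hInv : pvInv r totals houses [] allT) : pvSelectA r totals houses = -1 := by
  obtain ⟨_, _, _, _, _, hchar⟩ := hInv
  rw [pvSelectA_eq]
  have hnil : pvElig r houses = [] := by
    rw [List.eq_nil_iff_forall_not_mem]
    intro i hi
    have hmem := List.mem_filter.mp hi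
    have hrange := PySem.List.mem_pyRange_one.mp hmem.1
    have hpred := of_decide_eq_true hmem.2
    exact absurd ((hchar (PySem.List.pyGetD totals i 0) i).mpr
      ⟨hrange.1, hrange.2, hpred, rfl⟩) (by simp)
  rw [hnil]
  rfl

-- … and the head of active is exactly the index A's scan selects
lemma pvSel_head (r : List (List Int)) (totals houses : List Int) (t m : Int)
    (rest : List (Int × Int)) (allT : List Int)
    (hInv : pvInv r totals houses ((t, m) :: rest) allT) :
    pvSelectA r totals houses = m ∧ t = PySem.List.pyGetD totals m 0 ∧
      0 ≤ m ∧ m < (r.length : Int) ∧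
      PySem.List.pyGetD houses m 0 < PySem.List.len (PySem.List.pyGetD r m []) := by
  obtain ⟨_, _, _, _, hpair, hchar⟩ := hInv
  obtain ⟨hm0, hmn, helig, ht⟩ := (hchar t m).mp (by simp)
  have hsel : PySem.List.min? (pvElig r houses) (fun i => PySem.List.pyGetD totals i 0) = some m := by
    apply pvMin?_first
    · exact List.Pairwise.filter _ (PySem.List.pairwise_lt_pyRange_one _ _)
    · exact List.mem_filter.mpr ⟨PySem.List.mem_pyRange_one.mpr ⟨hm0, hmn⟩, decide_eq_true helig⟩
    · intro j hj
      have hmem := List.mem_filter.mp hj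
      have hrange := PySem.List.mem_pyRange_one.mp hmem.1
      have hpred := of_decide_eq_true hmem.2
      have hjact : (PySem.List.pyGetD totals j 0, j) ∈ (t, m) :: rest :=
        (hchar (PySem.List.pyGetD totals j 0) j).mpr ⟨hrange.1, hrange.2, hpred, rfl⟩
      rcases List.mem_cons.mp hjact with heq | hjr
      · have h2 : j = m := congrArg Prod.snd heq
        subst h2
        exact Or.inr ⟨rfl, le_refl j⟩
      · have hlt := List.rel_of_pairwise_cons hpair hjr
        simp only [pvPairLt] at hlt
        rcases hlt with h | ⟨h1, h2⟩
        · left; omega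
        · right; exact ⟨by omega, by omega⟩
  rw [pvSelectA_eq, hsel]
  exact ⟨rfl, ht, hm0, hmn, helig⟩

lemma pvLe_getLast : ∀ (l : List Int), l.Pairwise (· ≤ ·) → ∀ x ∈ l, ∀ (hn : l ≠ []), x ≤ l.getLast hn := by
  intro l
  induction l with
  | nil => intro _ x hx; simp at hx
  | cons a tl ih =>
    intro h x hx hn
    rw [List.pairwise_cons] at h
    cases tl with
    | nil => simp at hx; simp [hx, List.getLast]
    | cons b tl2 =>
      rw [List.getLast_cons (by simp)]
      rcases List.mem_cons.mp hx with rfl | hx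
      · exact le_trans (h.1 b (by simp)) (ih h.2 b (by simp) (by simp))
      · exact ih h.2 x hx (by simp)


lemma pvGetD_neg_one (a : Int) (tl : List Int) :
    PySem.List.pyGetD (a::tl) (-1) 0 = (a::tl).getLast (by simp) := by
  have h1 : PySem.List.pyIdx? (a::tl).length (-1) = some ((a::tl).length - 1) := by
    simp [PySem.List.pyIdx?]
  rw [PySem.List.pyGetD, PySem.List.pyGet?, h1]
  rw [List.getLast_eq_getElem]
  simp
  rfl

def pvMaxStep (key : Int → Int) (acc : Option Int) (x : Int) : Option Int :=
  acc.elim (some x) (fun m => if key m < key x then some x else some m)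
lemma pvMax?_eq_foldl (xs : List Int) (key : Int → Int) :
    PySem.List.max? xs key = xs.foldl (pvMaxStep key) none := by
  unfold PySem.List.max?; congr 1; funext acc x; cases acc <;> rfl
lemma pvFoldl_some_ne_none (f : Option Int → Int → Option Int)
    (hf : ∀ a x, f (some a) x ≠ none) :
    ∀ (l : List Int) (acc : Option Int), acc ≠ none → l.foldl f acc ≠ none := by
  intro l
  induction l with
  | nil => intro acc h; simpa using h
  | cons y ys ih =>
    intro acc h
    rw [List.foldl_cons]
    cases acc with
    | none => exact absurd rfl h
    | some a =>
      cases hfa : f (some a) y with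
      | none => exact absurd hfa (hf a y)
      | some b => rw [hfa] at *; exact ih (some b) (by simp)


-- max(totals)-min(totals) is last-minus-first of the sorted companion list
lemma pvSpread_eq (totals allT : List Int) (hp : allT.Perm totals)
    (hs : allT.Pairwise (· ≤ ·)) (hne : totals ≠ []) :
    pvSpread totals = PySem.List.pyGetD allT (-1) 0 - PySem.List.pyGetD allT 0 0 := by
  obtain ⟨x, xs, rfl⟩ := List.exists_cons_of_ne_nil hne
  cases allT with
  | nil => exact absurd hp.symm.eq_nil hne
  | cons a tl =>
    rw [List.pairwise_cons] at hs
    have hhead : PySem.List.pyGetD (a::tl) 0 0 = a := by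
      rw [PySem.List.pyGetD_of_nonneg _ 0 (le_refl 0)]; rfl
    have hlast := pvGetD_neg_one a tl
    cases hmin : PySem.List.min? (x :: xs) (fun y => y) with
    | none =>
      rw [pvMin?_eq_foldl, List.foldl_cons] at hmin
      exact pvFoldl_some_ne_none (pvMinStep (fun y => y))
        (fun a z => by by_cases h : z < a <;> simp [pvMinStep, h]) xs _ (by simp [pvMinStep]) hmin |>.elim
    | some v =>
      cases hmax : PySem.List.max? (x :: xs) (fun y => y) with
      | none =>
        rw [pvMax?_eq_foldl, List.foldl_cons] at hmax
        exact pvFoldl_some_ne_none (pvMaxStep (fun y => y))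
          (fun a z => by by_cases h : a < z <;> simp [pvMaxStep, h]) xs _ (by simp [pvMaxStep]) hmax |>.elim
      | some w =>
        have hva : v = a := by
          have hvm : v ∈ (a :: tl) := hp.mem_iff.mpr (PySem.List.min?_mem hmin)
          have h2 : v ≤ a := PySem.List.min?_isMin hmin a (hp.subset (by simp))
          rcases List.mem_cons.mp hvm with rfl | hvm
          · rfl
          · exact le_antisymm h2 (hs.1 v hvm)
        have hwl : w = (a :: tl).getLast (by simp) := by
          have hwm : w ∈ (a :: tl) := hp.mem_iff.mpr (PySem.List.max?_mem hmax)
          have hlm : (a :: tl).getLast (by simp) ∈ (a :: tl) := List.getLast_mem _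
          have h2 : (a :: tl).getLast (by simp) ≤ w :=
            PySem.List.max?_isMax hmax _ (hp.subset hlm)
          exact le_antisymm (pvLe_getLast _ (List.pairwise_cons.mpr hs) w hwm _) h2
        rw [pvSpread, hmin, hmax, hhead, hlast, hva, hwl]
        rfl


-- one step of the loop preserves the invariant
lemma pvStep_inv (r : List (List Int)) (totals houses : List Int) (t m : Int)
    (rest : List (Int × Int)) (allT : List Int)
    (hInv : pvInv r totals houses ((t, m) :: rest) allT) :
    pvInv r
      (PySem.List.pySetD totals m (t + PySem.List.pyGetD (PySem.List.pyGetD r m []) (PySem.List.pyGetD houses m 0) 0))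
      (PySem.List.pySetD houses m (PySem.List.pyGetD houses m 0 + 1))
      (if PySem.List.pyGetD houses m 0 + 1 < PySem.List.len (PySem.List.pyGetD r m [])
        then pvInsP (t + PySem.List.pyGetD (PySem.List.pyGetD r m []) (PySem.List.pyGetD houses m 0) 0, m) rest
        else rest)
      (pvInsV (t + PySem.List.pyGetD (PySem.List.pyGetD r m []) (PySem.List.pyGetD houses m 0) 0)
        (pvRemV t allT)) := by
  obtain ⟨hlt, hlh, hp, hs, hpair, hchar⟩ := hInv
  obtain ⟨hm0, hmn, helig, ht⟩ := (hchar t m).mp (by simp)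
  set nt := t + PySem.List.pyGetD (PySem.List.pyGetD r m []) (PySem.List.pyGetD houses m 0) 0 with hnt
  have hmtn : m.toNat < totals.length := by omega
  have htm : totals[m.toNat]'hmtn = t := by
    rw [ht, pvGetD_eq_getElem totals 0 m hm0 (by omega)]
  have htmem : t ∈ totals := htm ▸ List.getElem_mem hmtn
  have hrestpair := (List.pairwise_cons.mp hpair).2
  have hheadlt := (List.pairwise_cons.mp hpair).1
  have hmnotin : ∀ u, (u, m) ∉ rest := by
    intro u hu
    obtain ⟨_, _, _, hu'⟩ := (hchar u m).mp (List.mem_cons_of_mem _ hu)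
    rw [hu', ← ht] at hu
    exact pvPairLt_irrefl (t, m) (hheadlt (t, m) hu)
  have hget_h : ∀ i : Int, 0 ≤ i →
      PySem.List.pyGetD (PySem.List.pySetD houses m (PySem.List.pyGetD houses m 0 + 1)) i 0
        = if i = m then PySem.List.pyGetD houses m 0 + 1 else PySem.List.pyGetD houses i 0 :=
    fun i hi => pvGetD_setD houses i m _ hi hm0 (by omega)
  have hget_t : ∀ i : Int, 0 ≤ i →
      PySem.List.pyGetD (PySem.List.pySetD totals m nt) i 0
        = if i = m then nt else PySem.List.pyGetD totals i 0 :=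
    fun i hi => pvGetD_setD totals i m _ hi hm0 (by omega)
  refine ⟨?_, ?_, ?_, ?_, ?_, ?_⟩
  · rw [PySem.List.pySetD_of_nonneg _ _ hm0]; simpa using hlt
  · rw [PySem.List.pySetD_of_nonneg _ _ hm0]; simpa using hlh
  · -- permutation
    have p2 : (allT.erase t).Perm (totals.erase t) := hp.erase t
    have p3 : totals.Perm (t :: totals.erase t) := List.perm_cons_erase htmem
    have p4 : totals.Perm (t :: totals.eraseIdx m.toNat) := by
      have h4 := List.getElem_cons_eraseIdx_perm hmtn
      rw [htm] at h4
      exact h4.symm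
    have p5 : (totals.erase t).Perm (totals.eraseIdx m.toNat) := (p3.symm.trans p4).cons_inv
    have p6 : (totals.set m.toNat nt).Perm (nt :: totals.eraseIdx m.toNat) :=
      List.set_perm_cons_eraseIdx hmtn nt
    rw [PySem.List.pySetD_of_nonneg _ _ hm0, pvRemV_eq_erase]
    exact ((pvInsV_perm nt _).trans ((p2.trans p5).cons nt)).trans p6.symm
  · rw [pvRemV_eq_erase]
    exact pvInsV_sorted nt _ (hs.sublist (List.erase_sublist ..))
  · -- pairwise of active'
    split_ifs with hcond
    · refine pvInsP_pairwise _ _ hrestpair ?_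
      rintro ⟨qu, qi⟩ hq
      refine pvPairLt_total ?_
      intro hq2
      simp only at hq2
      rw [← hq2] at hq
      exact hmnotin qu hq
    · exact hrestpair
  · -- membership characterisation
    intro u i
    constructor
    · intro hmem
      have hrest_case : (u, i) ∈ rest →
          0 ≤ i ∧ i < (r.length : Int) ∧
            PySem.List.pyGetD (PySem.List.pySetD houses m (PySem.List.pyGetD houses m 0 + 1)) i 0
              < PySem.List.len (PySem.List.pyGetD r i []) ∧
            u = PySem.List.pyGetD (PySem.List.pySetD totals m nt) i 0 := by
        intro hr
        obtain ⟨hi0, hin, heligi, hu⟩ := (hchar u i).mp (List.mem_cons_of_mem _ hr)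
        have him : i ≠ m := by
          intro h; rw [h] at hr; exact hmnotin u hr
        rw [hget_h i hi0, if_neg him, hget_t i hi0, if_neg him]
        exact ⟨hi0, hin, heligi, hu⟩
      by_cases hcond : PySem.List.pyGetD houses m 0 + 1 < PySem.List.len (PySem.List.pyGetD r m [])
      · rw [if_pos hcond] at hmem
        rcases List.mem_cons.mp ((pvInsP_perm _ _).mem_iff.mp hmem) with heq | hr
        · have hu : u = nt := congrArg Prod.fst heq
          have hi : i = m := congrArg Prod.snd heq
          subst hu
          rw [hi, hget_h m hm0, if_pos rfl, hget_t m hm0, if_pos rfl]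
          exact ⟨hm0, hmn, hcond, rfl⟩
        · exact hrest_case hr
      · rw [if_neg hcond] at hmem
        exact hrest_case hmem
    · rintro ⟨hi0, hin, heligi, hu⟩
      by_cases him : i = m
      · subst him
        rw [hget_h i hi0, if_pos rfl] at heligi
        rw [hget_t i hi0, if_pos rfl] at hu
        subst hu
        rw [if_pos heligi]
        exact (pvInsP_perm _ _).mem_iff.mpr (by simp)
      · rw [hget_h i hi0, if_neg him] at heligi
        rw [hget_t i hi0, if_neg him] at hu
        have hold : (u, i) ∈ (t, m) :: rest := (hchar u i).mpr ⟨hi0, hin, heligi, hu⟩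
        have hr : (u, i) ∈ rest := by
          rcases List.mem_cons.mp hold with heq | hr
          · exact absurd (congrArg Prod.snd heq) him
          · exact hr
        split_ifs
        · exact (pvInsP_perm _ _).mem_iff.mpr (List.mem_cons_of_mem _ hr)
        · exact hr

-- the two loops agree under the invariant
lemma pvLoop_eq (r : List (List Int)) :
    ∀ (fuel : Nat) (totals houses : List Int) (active : List (Int × Int)) (allT : List Int)
      (best : List Int) (bs : Int),
      totals ≠ [] → pvInv r totals houses active allT →
      pvLoopA r fuel totals houses best bs = pvLoopB r fuel houses active allT best bs := by
  intro fuel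
  induction fuel with
  | zero => intro totals houses active allT best bs _ _; rfl
  | succ fuel ih =>
    intro totals houses active allT best bs hne hInv
    rw [pvLoopA, pvLoopB.eq_def]
    cases active with
    | nil =>
      rw [pvSel_nil r totals houses allT hInv]
      simp
    | cons p rest =>
      obtain ⟨t, m⟩ := p
      obtain ⟨hsel, ht, hm0, hmn, helig⟩ := pvSel_head r totals houses t m rest allT hInv
      have hmne : ¬ (pvSelectA r totals houses = -1) := by omega
      rw [if_neg hmne, hsel, ← ht]
      dsimp only []
      have hInv' := pvStep_inv r totals houses t m rest allT hInv
      have hne' : PySem.List.pySetD totals m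
          (t + PySem.List.pyGetD (PySem.List.pyGetD r m []) (PySem.List.pyGetD houses m 0) 0) ≠ [] := by
        rw [PySem.List.pySetD_of_nonneg _ _ hm0]
        intro h
        exact hne (by simpa using congrArg List.length h)
      have hspread := pvSpread_eq _ _ hInv'.2.2.1 hInv'.2.2.2.1 hne'
      rw [hspread]
      by_cases helig2 : PySem.List.pyGetD houses m 0 + 1 < PySem.List.len (PySem.List.pyGetD r m [])
      · rw [if_pos helig2] at hInv' ⊢
        split_ifs with hcmp
        · exact ih _ _ _ _ _ _ hne' hInv'
        · exact ih _ _ _ _ _ _ hne' hInv'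
      · rw [if_neg helig2] at hInv' ⊢
        split_ifs with hcmp
        · exact ih _ _ _ _ _ _ hne' hInv'
        · exact ih _ _ _ _ _ _ hne' hInv'

-- the initialisation loop of B establishes the invariant
def pvInitStep (r : List (List Int)) (st : List Int × List (Int × Int)) (i : Int) :
    List Int × List (Int × Int) :=
  let t := PySem.List.pyGetD (PySem.List.pyGetD r i []) 0 0
  (pvInsV t st.1,
   if 1 < PySem.List.len (PySem.List.pyGetD r i []) then pvInsP (t, i) st.2 else st.2)

lemma pvInit_aux (r : List (List Int)) : ∀ k : Nat, k ≤ r.length →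
    ((PySem.List.pyRange 0 (k : Int) 1).foldl (pvInitStep r) ([], [])).1.Perm
        ((r.map (fun row => PySem.List.pyGetD row 0 0)).take k) ∧
    ((PySem.List.pyRange 0 (k : Int) 1).foldl (pvInitStep r) ([], [])).1.Pairwise (· ≤ ·) ∧
    ((PySem.List.pyRange 0 (k : Int) 1).foldl (pvInitStep r) ([], [])).2.Pairwise pvPairLt ∧
    (∀ u i, (u, i) ∈ ((PySem.List.pyRange 0 (k : Int) 1).foldl (pvInitStep r) ([], [])).2 ↔
        0 ≤ i ∧ i < (k : Int) ∧ 1 < PySem.List.len (PySem.List.pyGetD r i []) ∧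
        u = PySem.List.pyGetD (r.map (fun row => PySem.List.pyGetD row 0 0)) i 0) := by
  intro k
  induction k with
  | zero =>
    intro _
    rw [show ((0 : Nat) : Int) = 0 by norm_num, PySem.List.pyRange_one_eq_nil (le_refl 0)]
    refine ⟨by simp, by simp, by simp, ?_⟩
    intro u i
    simp only [List.foldl_nil, List.not_mem_nil, false_iff]
    rintro ⟨h1, h2, _, _⟩
    omega
  | succ k ih =>
    intro hk1
    obtain ⟨ih1, ih2, ih3, ih4⟩ := ih (by omega)
    rw [show ((k + 1 : Nat) : Int) = (k : Int) + 1 by push_cast; ring,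
        PySem.List.pyRange_one_succ_right (by positivity), List.foldl_append,
        List.foldl_cons, List.foldl_nil]
    set st := (PySem.List.pyRange 0 (k : Int) 1).foldl (pvInitStep r) ([], []) with hst
    have hkl : ((k : Int)).toNat = k := Int.toNat_natCast k
    have hklt : k < r.length := by omega
    have hmapk : PySem.List.pyGetD (r.map (fun row => PySem.List.pyGetD row 0 0)) (k : Int) 0
        = PySem.List.pyGetD (PySem.List.pyGetD r (k : Int) []) 0 0 := by
      rw [pvGetD_eq_getElem (r.map _) 0 (k : Int) (by positivity) (by simpa using hklt),
          pvGetD_eq_getElem r [] (k : Int) (by positivity) (by simpa using hklt)]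
      simp [hkl]
    set tk := PySem.List.pyGetD (PySem.List.pyGetD r (k : Int) []) 0 0 with htk
    have hstep : pvInitStep r st (k : Int)
        = (pvInsV tk st.1,
           if 1 < PySem.List.len (PySem.List.pyGetD r (k : Int) []) then pvInsP (tk, (k : Int)) st.2 else st.2) := rfl
    rw [hstep]
    have htake : (r.map (fun row => PySem.List.pyGetD row 0 0)).take (k + 1)
        = (r.map (fun row => PySem.List.pyGetD row 0 0)).take k ++ [tk] := by
      rw [List.take_succ_eq_append_getElem (by simpa using hklt)]
      congr 1
      rw [← hmapk,
        pvGetD_eq_getElem (r.map _) 0 (k : Int) (by positivity) (by simpa using hklt)]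
      rfl
    refine ⟨?_, ?_, ?_, ?_⟩
    · rw [htake]
      exact (pvInsV_perm tk st.1).trans ((ih1.cons tk).trans (List.perm_append_singleton tk _).symm).symm.symm
    · exact pvInsV_sorted tk st.1 ih2
    · split_ifs with hb
      · refine pvInsP_pairwise _ _ ih3 ?_
        rintro ⟨qu, qi⟩ hq
        obtain ⟨_, hqk, _, _⟩ := (ih4 qu qi).mp hq
        exact pvPairLt_total (by simp; omega)
      · exact ih3
    · intro u i
      split_ifs with hb
      · constructor
        · intro hmem
          rcases List.mem_cons.mp ((pvInsP_perm _ _).mem_iff.mp hmem) with heq | hold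
          · have hu : u = tk := congrArg Prod.fst heq
            have hi : i = (k : Int) := congrArg Prod.snd heq
            subst hu
            rw [hi, hmapk]
            exact ⟨by positivity, by omega, hb, rfl⟩
          · obtain ⟨h1, h2, h3, h4⟩ := (ih4 u i).mp hold
            exact ⟨h1, by omega, h3, h4⟩
        · rintro ⟨h1, h2, h3, h4⟩
          by_cases hik : i = (k : Int)
          · subst hik
            rw [hmapk] at h4
            subst h4
            exact (pvInsP_perm _ _).mem_iff.mpr (by simp)
          · exact (pvInsP_perm _ _).mem_iff.mpr
              (List.mem_cons_of_mem _ ((ih4 u i).mpr ⟨h1, by omega, h3, h4⟩))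
      · constructor
        · intro hmem
          obtain ⟨h1, h2, h3, h4⟩ := (ih4 u i).mp hmem
          exact ⟨h1, by omega, h3, h4⟩
        · rintro ⟨h1, h2, h3, h4⟩
          have hik : i ≠ (k : Int) := by
            intro h
            rw [h] at h3
            exact hb h3
          exact (ih4 u i).mpr ⟨h1, by omega, h3, h4⟩

lemma pvInit_inv (r : List (List Int)) :
    pvInv r (r.map (fun row => PySem.List.pyGetD row 0 0)) (List.replicate r.length (1 : Int))
      ((PySem.List.pyRange 0 (r.length : Int) 1).foldl (pvInitStep r) ([], [])).2
      ((PySem.List.pyRange 0 (r.length : Int) 1).foldl (pvInitStep r) ([], [])).1 := by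
  obtain ⟨h1, h2, h3, h4⟩ := pvInit_aux r r.length (le_refl _)
  have htake : (r.map (fun row => PySem.List.pyGetD row 0 0)).take r.length
      = r.map (fun row => PySem.List.pyGetD row 0 0) := by
    exact List.take_of_length_le (by simp)
  rw [htake] at h1
  refine ⟨by simp, by simp, h1, h2, h3, ?_⟩
  intro u i
  rw [h4 u i]
  constructor
  · rintro ⟨c1, c2, c3, c4⟩
    refine ⟨c1, c2, ?_, c4⟩
    rw [pvGetD_eq_getElem (List.replicate r.length (1 : Int)) 0 i c1 (by simpa using c2)]
    simpa using c3
  · rintro ⟨c1, c2, c3, c4⟩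
    refine ⟨c1, c2, ?_, c4⟩
    rw [pvGetD_eq_getElem (List.replicate r.length (1 : Int)) 0 i c1 (by simpa using c2)] at c3
    simpa using c3

-- ===== VERDICT (by name: the statement is the Claim_ definition above) =====
theorem equitableMeetup_spec : Claim_equal_equitableMeetup := by
  intro r _ hpre
  unfold Spec_equitableMeetup equitableMeetup equitableMeetup_alt
  have hne : r.map (fun row => PySem.List.pyGetD row 0 0) ≠ [] := by
    simpa using hpre.1
  obtain ⟨h1, h2, hp, hs, h5, h6⟩ := pvInit_inv r
  show pvLoopA r ((r.map List.length).sum + 1) (r.map (fun row => PySem.List.pyGetD row 0 0))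
      (List.replicate r.length (1 : Int)) (List.replicate r.length (1 : Int))
      (pvSpread (r.map (fun row => PySem.List.pyGetD row 0 0)))
    = pvLoopB r ((r.map List.length).sum + 1) (List.replicate r.length (1 : Int))
      ((PySem.List.pyRange 0 (r.length : Int) 1).foldl (pvInitStep r) ([], [])).2
      ((PySem.List.pyRange 0 (r.length : Int) 1).foldl (pvInitStep r) ([], [])).1
      (List.replicate r.length (1 : Int))
      (PySem.List.pyGetD ((PySem.List.pyRange 0 (r.length : Int) 1).foldl (pvInitStep r) ([], [])).1 (-1) 0 -
       PySem.List.pyGetD ((PySem.List.pyRange 0 (r.length : Int) 1).foldl (pvInitStep r) ([], [])).1 0 0)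
  rw [← pvSpread_eq _ _ hp hs hne]
  exact pvLoop_eq r _ _ _ _ _ _ _ hne ⟨h1, h2, hp, hs, h5, h6⟩
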